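-- pv_equiv track=rewrite | github.com/yak9909/generate_bar | tools.py | add_str
-- ===== SOURCE A (Python) =====
-- def add_str(last_times: int, start_times: int, end_times: int, first: str, middle: str, last: str):
--     result = []
--     for x in range(start_times, end_times):
--         if x == 0:
--             result.append(first)
--             continue
--         elif x == last_times - 1:
--             result.append(last)
--             continue
--         result.append(middle)
--
--     return result
-- ===== SOURCE B (Python) =====
-- def add_str(last_times: int, start_times: int, end_times: int, first: str, middle: str, last: str):
--     n = end_times - start_times
--     result = [middle] * n  # [] when n <= 0
--     if start_times <= last_times - 1 < end_times:
--         result[last_times - 1 - start_times] = last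
--     if start_times <= 0 < end_times:
--         result[0 - start_times] = first
--     return result
-- ===== Notes on version B (the rewrite author's own statement) =====
-- stated objective: simpler
-- what changed: Replaces the per-element loop with list multiplication [middle]*n followed by direct assignment of the two special positions ('last' first, then 'first' so it wins the collision, matching A's if/elif priority).
import Mathlib
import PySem

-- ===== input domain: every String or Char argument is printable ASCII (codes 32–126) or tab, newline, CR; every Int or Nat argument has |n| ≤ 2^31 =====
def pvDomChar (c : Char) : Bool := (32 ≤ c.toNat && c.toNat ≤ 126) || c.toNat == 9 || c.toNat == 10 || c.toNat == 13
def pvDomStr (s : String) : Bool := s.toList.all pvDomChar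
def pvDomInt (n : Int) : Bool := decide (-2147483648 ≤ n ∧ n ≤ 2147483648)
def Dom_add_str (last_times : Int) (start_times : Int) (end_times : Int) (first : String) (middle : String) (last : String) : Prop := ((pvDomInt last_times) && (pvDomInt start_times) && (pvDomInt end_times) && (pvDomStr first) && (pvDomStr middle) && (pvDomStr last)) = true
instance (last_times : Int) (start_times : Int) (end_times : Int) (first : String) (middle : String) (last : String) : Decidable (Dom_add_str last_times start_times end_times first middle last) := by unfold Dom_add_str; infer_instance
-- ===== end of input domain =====

-- B replaces A's per-element loop by building [middle]×n at once and patching the two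
-- special positions ('last' then 'first', so 'first' wins the collision): simpler, no branch per element.


-- ===== PORT A =====
def add_str (last_times : Int) (start_times : Int) (end_times : Int) (first : String) (middle : String) (last : String) : List String :=
  (PySem.List.pyRange start_times end_times 1).foldl (fun result x =>
    if x = 0 then result ++ [first]
    else if x = last_times - 1 then result ++ [last]
    else result ++ [middle]) []

-- ===== PORT B =====
def add_str_alt (last_times : Int) (start_times : Int) (end_times : Int) (first : String) (middle : String) (last : String) : List String :=
  let n := (end_times - start_times).toNat
  let r0 := List.replicate n middle
  let r1 := if start_times ≤ last_times - 1 ∧ last_times - 1 < end_times then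
              r0.set (last_times - 1 - start_times).toNat last else r0
  if start_times ≤ 0 ∧ 0 < end_times then r1.set (0 - start_times).toNat first else r1

-- ===== PRECONDITION & SPEC =====
def Spec_add_str (last_times : Int) (start_times : Int) (end_times : Int) (first : String) (middle : String) (last : String) (out : List String) : Prop := out = add_str_alt last_times start_times end_times first middle last
instance (last_times : Int) (start_times : Int) (end_times : Int) (first : String) (middle : String) (last : String) (out : List String) : Decidable (Spec_add_str last_times start_times end_times first middle last out) := by unfold Spec_add_str; infer_instance

-- ===== CLAIM (what is proved, stated in full; the proofs are below) =====
def Claim_equal_add_str : Prop := ∀ (last_times : Int) (start_times : Int) (end_times : Int) (first : String) (middle : String) (last : String), Dom_add_str last_times start_times end_times first middle last → Spec_add_str last_times start_times end_times first middle last (add_str last_times start_times end_times first middle last)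

-- ===== LEMMAS AND PROOFS =====

-- A's loop is a map of the per-index choice over the range.
theorem add_str_eq_map (last_times start_times end_times : Int) (first middle last : String) :
    add_str last_times start_times end_times first middle last =
      (List.range (end_times - start_times).toNat).map (fun (k : Nat) =>
        if (start_times + (k : Int)) = 0 then first
        else if (start_times + (k : Int)) = last_times - 1 then last
        else middle) := by
  unfold add_str
  have hbody : (fun (result : List String) (x : Int) =>
      if x = 0 then result ++ [first]
      else if x = last_times - 1 then result ++ [last]
      else result ++ [middle]) =
      fun result x => result ++ [if x = 0 then first
        else if x = last_times - 1 then last else middle] := by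
    funext r x; split_ifs <;> rfl
  rw [hbody, PySem.List.foldl_append_singleton_eq_map, PySem.List.pyRange_one, List.map_map]
  rfl

theorem add_str_alt_length (last_times start_times end_times : Int) (first middle last : String) :
    (add_str_alt last_times start_times end_times first middle last).length =
      (end_times - start_times).toNat := by
  unfold add_str_alt
  split_ifs <;> simp

-- ===== VERDICT (by name: the statement is the Claim_ definition above) =====
theorem add_str_spec : Claim_equal_add_str := by
  intro lt st et first middle last _
  show add_str lt st et first middle last = add_str_alt lt st et first middle last
  rw [add_str_eq_map]
  apply List.ext_getElem
  · simp [add_str_alt_length]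
  · intro i h1 h2
    have hn : i < (et - st).toNat := by
      simpa using h1
    simp only [List.getElem_map, List.getElem_range]
    unfold add_str_alt
    split_ifs <;>
      simp only [List.getElem_set, List.getElem_replicate] <;>
      (try split_ifs) <;>
      first | rfl | omega
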